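-- pv_equiv track=rewrite | github.com/youfa555/myvv | fetch_and_build.py | dedup_prefer_longer
-- ===== SOURCE A (Python) =====
-- def dedup_prefer_longer(urls):
--     # 以“去掉 #fragment 后”的主体作为 key，保留更长的那一条
--     best = {}
--     order = []
--     for u in urls:
--         key = u.split("#", 1)[0]
--         if key not in best or len(u) > len(best[key]):
--             best[key] = u
--             if key not in order:
--                 order.append(key)
--     return [best[k] for k in order]
-- ===== SOURCE B (Python) =====
-- def dedup_prefer_longer(urls):
--     # Group URLs by their pre-fragment body, then pick the first longest of each group.
--     groups = {}
--     for u in urls: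
--         groups.setdefault(u.split("#", 1)[0], []).append(u)
--     return [max(g, key=len) for g in groups.values()]
-- ===== Notes on version B (the rewrite author's own statement) =====
-- stated objective: faster
-- what changed: Replaces A's incremental best-so-far dict plus separate order list (with a linear 'key not in order' scan per insertion) by a group-by-key table (setdefault/append) followed by max(group, key=len) per group; dict insertion order gives first-appearance order and max's first-maximal tie-break matches A's strict comparison.
import Mathlib
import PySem

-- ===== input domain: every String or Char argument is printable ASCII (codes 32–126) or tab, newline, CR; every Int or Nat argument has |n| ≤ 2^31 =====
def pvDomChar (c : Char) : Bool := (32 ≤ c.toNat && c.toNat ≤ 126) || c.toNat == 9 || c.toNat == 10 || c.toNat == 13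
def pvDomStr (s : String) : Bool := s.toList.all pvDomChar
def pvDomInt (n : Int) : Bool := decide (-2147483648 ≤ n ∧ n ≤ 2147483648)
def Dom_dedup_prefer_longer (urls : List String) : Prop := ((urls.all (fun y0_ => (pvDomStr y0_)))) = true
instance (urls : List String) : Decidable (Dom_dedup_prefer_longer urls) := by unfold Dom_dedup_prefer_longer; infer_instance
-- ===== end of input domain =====

-- B replaces A's incremental best-so-far dict + separate order list by a group-by-key
-- table followed by a per-group first-longest reduction (objective: simpler).

-- key = u.split("#", 1)[0]  (split always returns at least one piece, so [0] cannot raise)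
def pvKey (u : String) : String := ((PySem.Str.splitMax? u "#" 1).getD []).headD ""

-- ===== PORT A =====
-- one iteration of A's loop over the state (best, order)
def pvStepA (st : PySem.Dict String String × List String) (u : String) :
    PySem.Dict String String × List String :=
  if ¬ st.1.contains (pvKey u) = true ∨
      PySem.Str.len ((st.1.get? (pvKey u)).getD "") < PySem.Str.len u then
    (st.1.insert (pvKey u) u,
     if pvKey u ∈ st.2 then st.2 else st.2 ++ [pvKey u])
  else st

def dedup_prefer_longer (urls : List String) : List String :=
  let st := urls.foldl pvStepA (PySem.Dict.mk [], [])
  st.2.map (fun k => (st.1.get? k).getD "")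

-- ===== PORT B =====
-- groups.setdefault(key, []).append(u)
def pvStepB (g : PySem.Dict String (List String)) (u : String) :
    PySem.Dict String (List String) :=
  match g.get? (pvKey u) with
  | none => g.insert (pvKey u) [u]
  | some xs => g.insert (pvKey u) (xs ++ [u])

-- max(g, key=len); groups only ever hold non-empty lists, so the default is never used
def pvFMax (xs : List String) : String := (PySem.List.max? xs PySem.Str.len).getD ""

def dedup_prefer_longer_alt (urls : List String) : List String :=
  ((urls.foldl pvStepB (PySem.Dict.mk [])).values).map pvFMax

-- ===== PRECONDITION & SPEC =====
def Spec_dedup_prefer_longer (urls : List String) (out : List String) : Prop := out = dedup_prefer_longer_alt urls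
instance (urls : List String) (out : List String) : Decidable (Spec_dedup_prefer_longer urls out) := by unfold Spec_dedup_prefer_longer; infer_instance

-- ===== CLAIM (what is proved, stated in full; the proofs are below) =====
def Claim_equal_dedup_prefer_longer : Prop := ∀ (urls : List String), Dom_dedup_prefer_longer urls → Spec_dedup_prefer_longer urls (dedup_prefer_longer urls)

-- ===== LEMMAS AND PROOFS =====

-- A's entry for a key is the first-longest member of B's group for that key
def pvF (p : String × List String) : String × String := (p.1, pvFMax p.2)

-- loop invariant tying A's state (best, order) to B's groups
def pvInv (st : PySem.Dict String String × List String)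
    (g : PySem.Dict String (List String)) : Prop :=
  st.1.items = g.items.map pvF ∧ st.2 = g.items.map Prod.fst ∧
    (g.items.map Prod.fst).Nodup ∧ ∀ p ∈ g.items, p.2 ≠ []

theorem pv_find?_key_self {ν : Type} (L : List (String × ν))
    (h : (L.map Prod.fst).Nodup) (p : String × ν) (hp : p ∈ L) :
    L.find? (fun q => q.1 == p.1) = some p := by
  induction L with
  | nil => simp at hp
  | cons a L ih =>
      simp only [List.map_cons, List.nodup_cons] at h
      rcases List.mem_cons.mp hp with rfl | hp'
      · simp [List.find?]
      · have hne : ¬ (a.1 == p.1) = true := by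
          simp only [beq_iff_eq]
          intro he
          exact h.1 (he ▸ List.mem_map_of_mem hp')
        simp [List.find?, hne, ih h.2 hp']

theorem pv_key_inj {ν : Type} (L : List (String × ν))
    (h : (L.map Prod.fst).Nodup) (p q : String × ν) (hp : p ∈ L) (hq : q ∈ L)
    (hk : p.1 = q.1) : p = q := by
  have h1 := pv_find?_key_self L h p hp
  have h2 := pv_find?_key_self L h q hq
  rw [hk] at h1
  exact Option.some_injective _ (h1.symm.trans h2)

def pvMaxStep (acc : Option String) (x : String) : Option String :=
  match acc with
  | none => some x
  | some m => if PySem.Str.len m < PySem.Str.len x then some x else some m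

theorem pv_max?_eq_foldl (xs : List String) :
    PySem.List.max? xs PySem.Str.len = xs.foldl pvMaxStep none := by
  unfold PySem.List.max?
  congr 1
  funext acc x
  cases acc <;> rfl

theorem pv_foldl_max_isSome (l : List String) (o : Option String) (ho : o.isSome) :
    (List.foldl pvMaxStep o l).isSome := by
  induction l generalizing o with
  | nil => exact ho
  | cons b l ih =>
      rw [List.foldl_cons]
      apply ih
      cases o with
      | none => simp at ho
      | some a =>
          show (if PySem.Str.len a < PySem.Str.len b then some b else some a).isSome = true
          split <;> rfl

theorem pv_max?_some_of_ne_nil (xs : List String) (h : xs ≠ []) :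
    ∃ m, PySem.List.max? xs PySem.Str.len = some m := by
  have := pv_foldl_max_isSome xs none
  cases xs with
  | nil => exact absurd rfl h
  | cons a l =>
      have hs : (PySem.List.max? (a :: l) PySem.Str.len).isSome := by
        rw [pv_max?_eq_foldl, List.foldl_cons]
        exact pv_foldl_max_isSome l (pvMaxStep none a) rfl
      exact Option.isSome_iff_exists.mp hs

theorem pv_max?_append_singleton (xs : List String) (u m : String)
    (h : PySem.List.max? xs PySem.Str.len = some m) :
    PySem.List.max? (xs ++ [u]) PySem.Str.len =
      if PySem.Str.len m < PySem.Str.len u then some u else some m := by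
  rw [pv_max?_eq_foldl] at h ⊢
  rw [List.foldl_append, h, List.foldl_cons, List.foldl_nil]
  rfl

theorem pv_inv_step (st : PySem.Dict String String × List String)
    (g : PySem.Dict String (List String)) (u : String) (h : pvInv st g) :
    pvInv (pvStepA st u) (pvStepB g u) := by
  obtain ⟨h1, h2, h3, h4⟩ := h
  set k := pvKey u with hk
  have hcon : st.1.contains k = g.items.any (fun p => p.1 == k) := by
    rw [PySem.Dict.contains, h1, List.any_map]; rfl
  have hget : st.1.get? k =
      (g.items.find? (fun p => p.1 == k)).map (fun p => pvFMax p.2) := by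
    rw [PySem.Dict.get?, h1, List.find?_map]
    have hc : ((fun q : String × String => q.1 == k) ∘ pvF) =
        (fun q : String × List String => q.1 == k) := rfl
    rw [hc, Option.map_map]; rfl
  cases hfind : g.items.find? (fun p => p.1 == k) with
  | none =>
      have hmem : ∀ p ∈ g.items, ¬ p.1 = k := by
        intro p hp
        have := List.find?_eq_none.mp hfind p hp
        simpa using this
      have hgetg : g.get? k = none := by rw [PySem.Dict.get?, hfind]; rfl
      have hconb : g.items.any (fun p => p.1 == k) = false := by
        rw [List.any_eq_false]
        intro p hp
        simpa using hmem p hp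
      have hcf : st.1.contains k = false := by rw [hcon, hconb]
      have hgcon : g.contains k = false := by rw [PySem.Dict.contains, hconb]
      unfold pvStepB
      rw [← hk, hgetg]
      unfold pvStepA
      rw [← hk, if_pos (Or.inl (by simp [hcf]))]
      have hAins : (st.1.insert k u).items = st.1.items ++ [(k, u)] := by
        rw [PySem.Dict.insert, if_neg (by simp [hcf])]
      have hBins : (g.insert k [u]).items = g.items ++ [(k, [u])] := by
        rw [PySem.Dict.insert, if_neg (by simp [hgcon])]
      have hnotord : ¬ k ∈ st.2 := by
        rw [h2]
        intro hmemk
        obtain ⟨p, hp, hpk⟩ := List.mem_map.mp hmemk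
        exact hmem p hp hpk
      refine ⟨?_, ?_, ?_, ?_⟩
      · show (st.1.insert k u).items = _
        rw [hAins, hBins, List.map_append, h1]
        rfl
      · show (if k ∈ st.2 then st.2 else st.2 ++ [k]) = _
        rw [if_neg hnotord, hBins, List.map_append, h2]
        rfl
      · rw [hBins, List.map_append]
        simp only [List.map_cons, List.map_nil]
        simp [List.nodup_append, h3]
        exact fun a x hax he => hmem (a, x) hax he
      · intro p hp
        rw [hBins] at hp
        rcases List.mem_append.mp hp with hp' | hp'
        · exact h4 p hp'
        · simp only [List.mem_singleton] at hp'
          subst hp'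
          simp
  | some p0 =>
      have hp0mem := List.mem_of_find?_eq_some hfind
      have hp0k : p0.1 = k := by
        have := List.find?_some hfind
        simpa using this
      have hgetg : g.get? k = some p0.2 := by rw [PySem.Dict.get?, hfind]; rfl
      have hconT : g.items.any (fun q => q.1 == k) = true :=
        List.any_eq_true.mpr ⟨p0, hp0mem, by simp [hp0k]⟩
      have hxsne : p0.2 ≠ [] := h4 p0 hp0mem
      obtain ⟨m, hm⟩ := pv_max?_some_of_ne_nil p0.2 hxsne
      have hfm : pvFMax p0.2 = m := by rw [pvFMax, hm]; rfl
      have hmapp := pv_max?_append_singleton p0.2 u m hm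
      have hBins : (pvStepB g u).items =
          g.items.map (fun q => if q.1 == k then (k, p0.2 ++ [u]) else q) := by
        unfold pvStepB
        rw [← hk, hgetg]
        show (g.insert k (p0.2 ++ [u])).items = _
        rw [PySem.Dict.insert, if_pos (by rw [PySem.Dict.contains]; exact hconT)]
      have hkord : k ∈ st.2 := by
        rw [h2]
        exact hp0k ▸ List.mem_map_of_mem hp0mem
      have hfstB : (g.items.map (fun q => if q.1 == k then (k, p0.2 ++ [u]) else q)).map
          Prod.fst = g.items.map Prod.fst := by
        rw [List.map_map]
        apply List.map_congr_left
        intro q _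
        by_cases hqk : q.1 = k
        · simp [hqk]
        · simp [hqk]
      have huniq : ∀ q ∈ g.items, q.1 = k → q = p0 := fun q hq hqk =>
        pv_key_inj g.items h3 q p0 hq hp0mem (hqk.trans hp0k.symm)
      have hgetA : st.1.get? k = some m := by rw [hget, hfind, Option.map_some, hfm]
      have hAconT : st.1.contains k = true := by rw [hcon]; exact hconT
      have hne : ∀ p ∈ (pvStepB g u).items, p.2 ≠ [] := by
        intro p hp
        rw [hBins] at hp
        obtain ⟨q, hq, hqe⟩ := List.mem_map.mp hp
        by_cases hqk : q.1 = k
        · rw [if_pos (by simp [hqk])] at hqe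
          subst hqe
          simp
        · rw [if_neg (by simp [hqk])] at hqe
          subst hqe
          exact h4 q hq
      by_cases hlt : PySem.Str.len m < PySem.Str.len u
      · have hcond : ¬ st.1.contains k = true ∨
            PySem.Str.len ((st.1.get? k).getD "") < PySem.Str.len u :=
          Or.inr (by rw [hgetA]; exact hlt)
        unfold pvStepA
        rw [← hk, if_pos hcond]
        have hAins : (st.1.insert k u).items =
            st.1.items.map (fun q => if q.1 == k then (k, u) else q) := by
          rw [PySem.Dict.insert, if_pos hAconT]
        refine ⟨?_, ?_, ?_, hne⟩
        · show (st.1.insert k u).items = _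
          rw [hAins, h1, hBins, List.map_map, List.map_map]
          apply List.map_congr_left
          intro q hq
          simp only [Function.comp_apply]
          by_cases hqk : q.1 = k
          · have hq0 : q = p0 := huniq q hq hqk
            subst hq0
            have hmaxu : pvFMax (q.2 ++ [u]) = u := by
              rw [pvFMax, hmapp, if_pos hlt]
              rfl
            simp [pvF, hqk, hmaxu]
          · simp [pvF, hqk]
        · show (if k ∈ st.2 then st.2 else st.2 ++ [k]) = _
          rw [if_pos hkord, hBins, hfstB, h2]
        · rw [hBins, hfstB]
          exact h3
      · have hcond : ¬ (¬ st.1.contains k = true ∨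
            PySem.Str.len ((st.1.get? k).getD "") < PySem.Str.len u) := by
          push Not
          refine ⟨by simp [hAconT], ?_⟩
          rw [hgetA]
          simpa using hlt
        unfold pvStepA
        rw [← hk, if_neg hcond]
        refine ⟨?_, ?_, ?_, hne⟩
        · rw [h1, hBins, List.map_map]
          apply List.map_congr_left
          intro q hq
          simp only [Function.comp_apply]
          by_cases hqk : q.1 = k
          · have hq0 : q = p0 := huniq q hq hqk
            subst hq0
            have hmaxm : pvFMax (q.2 ++ [u]) = m := by
              rw [pvFMax, hmapp, if_neg hlt]
              rfl
            simp [pvF, hqk, hmaxm, hfm]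
          · simp [pvF, hqk]
        · rw [h2, hBins, hfstB]
        · rw [hBins, hfstB]
          exact h3

theorem pv_inv_fold (urls : List String) :
    pvInv (urls.foldl pvStepA (PySem.Dict.mk [], []))
      (urls.foldl pvStepB (PySem.Dict.mk [])) := by
  suffices h : ∀ (l : List String) st g, pvInv st g →
      pvInv (l.foldl pvStepA st) (l.foldl pvStepB g) by
    exact h urls _ _ ⟨rfl, rfl, List.nodup_nil, by simp⟩
  intro l
  induction l with
  | nil => intro st g h; exact h
  | cons u l ih => intro st g h; exact ih _ _ (pv_inv_step st g u h)

-- ===== VERDICT (by name: the statement is the Claim_ definition above) =====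
theorem dedup_prefer_longer_spec : Claim_equal_dedup_prefer_longer := by
  intro urls _
  unfold Spec_dedup_prefer_longer
  obtain ⟨h1, h2, h3, _⟩ := pv_inv_fold urls
  show (List.foldl pvStepA (PySem.Dict.mk [], []) urls).2.map
      (fun k => ((List.foldl pvStepA (PySem.Dict.mk [], []) urls).1.get? k).getD "") =
    ((List.foldl pvStepB (PySem.Dict.mk []) urls).values).map pvFMax
  rw [h2, PySem.Dict.values, List.map_map, List.map_map]
  apply List.map_congr_left
  intro p hp
  have hf : (List.foldl pvStepA (PySem.Dict.mk [], []) urls).1.items.find?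
      (fun q => q.1 == p.1) = some (pvF p) := by
    rw [h1, List.find?_map]
    have hc : ((fun q : String × String => q.1 == p.1) ∘ pvF) =
        (fun q : String × List String => q.1 == p.1) := rfl
    rw [hc, pv_find?_key_self _ h3 p hp, Option.map_some]
  show ((_root_.List.foldl pvStepA (PySem.Dict.mk [], []) urls).1.get? p.1).getD "" = pvFMax p.2
  rw [PySem.Dict.get?, hf, Option.map_some, Option.getD_some]
  rfl
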